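-- pv_equiv track=rewrite | github.com/hyunseungbin9408/Python | algorithm/Level_1/Roller_coaster.py | solution
-- ===== SOURCE A (Python) =====
-- def solution(price, money, count):
--     result = 0
--     for i in range(1,count+1):
--         result += price * i
--     if money <= result and result != money:
--         return(result - money)
--     else:
--         return(0)
-- ===== SOURCE B (Python) =====
-- def solution(price, money, count):
--     total = price * count * (count + 1) // 2 if count > 0 else 0
--     return max(total - money, 0)
-- ===== Notes on version B (the rewrite author's own statement) =====
-- stated objective: faster
-- what changed: Replaces the O(count) accumulation loop with the closed-form arithmetic sum price*count*(count+1)//2 and expresses the conditional shortfall as max(total-money, 0).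
import Mathlib
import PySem

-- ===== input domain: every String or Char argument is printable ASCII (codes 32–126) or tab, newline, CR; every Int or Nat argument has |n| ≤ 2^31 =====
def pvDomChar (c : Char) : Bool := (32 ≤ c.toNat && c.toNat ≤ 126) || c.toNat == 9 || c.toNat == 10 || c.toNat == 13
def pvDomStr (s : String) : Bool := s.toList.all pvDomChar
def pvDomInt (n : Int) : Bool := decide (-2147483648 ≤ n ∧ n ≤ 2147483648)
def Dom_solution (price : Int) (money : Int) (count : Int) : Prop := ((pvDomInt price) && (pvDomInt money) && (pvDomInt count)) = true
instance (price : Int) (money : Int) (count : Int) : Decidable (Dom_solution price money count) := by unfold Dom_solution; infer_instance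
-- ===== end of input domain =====

-- B replaces A's O(count) loop by the closed-form sum price*count*(count+1)//2 and max(total-money, 0).

-- ===== PORT A =====
def solution (price : Int) (money : Int) (count : Int) : Int :=
  let result := (PySem.List.pyRange 1 (count + 1) 1).foldl (fun r i => r + price * i) 0
  if money ≤ result ∧ result ≠ money then result - money else 0

-- ===== PORT B =====
def solution_alt (price : Int) (money : Int) (count : Int) : Int :=
  let total := if 0 < count then PySem.Int.floordiv (price * count * (count + 1)) 2 else 0
  max (total - money) 0

-- ===== PRECONDITION & SPEC =====
def Spec_solution (price : Int) (money : Int) (count : Int) (out : Int) : Prop := out = solution_alt price money count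
instance (price : Int) (money : Int) (count : Int) (out : Int) : Decidable (Spec_solution price money count out) := by unfold Spec_solution; infer_instance

-- ===== CLAIM (what is proved, stated in full; the proofs are below) =====
def Claim_equal_solution : Prop := ∀ (price : Int) (money : Int) (count : Int), Dom_solution price money count → Spec_solution price money count (solution price money count)

-- ===== LEMMAS AND PROOFS =====

-- Twice A's loop sum, for i = 1..n, is price*n*(n+1).
theorem two_mul_fold (price : Int) (n : Nat) :
    2 * (PySem.List.pyRange 1 ((n : Int) + 1) 1).foldl (fun r i => r + price * i) 0
      = price * n * (n + 1) := by
  induction n with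
  | zero => simp [PySem.List.pyRange_one_eq_nil]
  | succ m ih =>
      have h : PySem.List.pyRange 1 ((m : Int) + 1 + 1) 1
          = PySem.List.pyRange 1 ((m : Int) + 1) 1 ++ [(m : Int) + 1] :=
        PySem.List.pyRange_one_succ_right (by omega)
      push_cast
      rw [show ((m : Int) + 1 + 1) = ((m : Int) + 1) + 1 from rfl, h, List.foldl_append]
      simp only [List.foldl]
      ring_nf
      ring_nf at ih
      linarith

theorem fold_closed (price count : Int) (h : 0 < count) :
    (PySem.List.pyRange 1 (count + 1) 1).foldl (fun r i => r + price * i) 0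
      = PySem.Int.floordiv (price * count * (count + 1)) 2 := by
  obtain ⟨n, rfl⟩ : ∃ n : Nat, count = (n : Int) := ⟨count.toNat, by omega⟩
  have h2 := two_mul_fold price n
  rw [show price * (n : Int) * ((n : Int) + 1) = 2 * ((PySem.List.pyRange 1 ((n : Int) + 1) 1).foldl (fun r i => r + price * i) 0) from h2.symm]
  rw [PySem.Int.floordiv_eq_ediv_of_pos (by omega)]
  omega

theorem fold_nil (price count : Int) (h : count ≤ 0) :
    (PySem.List.pyRange 1 (count + 1) 1).foldl (fun r i => r + price * i) 0 = 0 := by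
  rw [PySem.List.pyRange_one_eq_nil (by omega)]; rfl

-- ===== VERDICT (by name: the statement is the Claim_ definition above) =====
theorem solution_spec : Claim_equal_solution := by
  intro price money count _
  unfold Spec_solution solution solution_alt
  by_cases h : 0 < count
  · rw [fold_closed price count h]
    simp only [h, if_pos]
    set S := PySem.Int.floordiv (price * count * (count + 1)) 2
    by_cases hc : money ≤ S ∧ S ≠ money
    · rw [if_pos hc]; omega
    · rw [if_neg hc]; push Not at hc; omega
  · rw [fold_nil price count (by omega)]
    simp only [h, if_neg, not_false_iff]
    by_cases hc : money ≤ (0:Int) ∧ (0:Int) ≠ money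
    · rw [if_pos hc]; omega
    · rw [if_neg hc]; push Not at hc; omega
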